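-- pv_equiv track=rewrite | github.com/SherryJYC/PolyUCourseworks | COMP3211/FaultLocalizationTool/Code_and_Testcases/Tarantula.py | cal_datalist
-- ===== SOURCE A (Python) =====
-- def cal_datalist(l, size):
--     data_list = [None] * size
--     for k in range(size):
--         data_list[k] = [0] * 4
--     for item in l:
--         i = 0
--         flag = int(item[-1])
--         for data in item:
--             if i >= size:
--                 break
--             data = int(data)
--             if flag == 1 and data == 1:
--                 data_list[i][0] += 1 #successful pass
--             elif flag == 1 and data == 0:
--                 data_list[i][1] += 1 #successful no pass
--             elif flag == 0 and data == 1: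
--                 data_list[i][2] += 1 #unsccessful pass
--             elif flag == 0 and data == 0:
--                 data_list[i][3] += 1
--             i += 1
--     return data_list
-- ===== SOURCE B (Python) =====
-- def cal_datalist(l, size):
--     # Column-major: precompute the flags once, then build each position's
--     # [0,0,0,0] counter row by scanning the rows for that column.
--     flags = [int(item[-1]) for item in l]
--     table = []
--     for k in range(size):
--         row = [0, 0, 0, 0]
--         for item, f in zip(l, flags):
--             if k < len(item):
--                 v = int(item[k])
--                 if f in (0, 1) and v in (0, 1):
--                     row[(1 - f) * 2 + (1 - v)] += 1
--         table.append(row)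
--     return table
-- ===== Notes on version B (the rewrite author's own statement) =====
-- stated objective: alternative
-- what changed: B traverses column-major: it precomputes the per-row flags once and builds each position's 4-counter by folding over the rows with a single arithmetic slot index (1-f)*2+(1-v), instead of A's row-major sweep that mutates all position rows while walking each item.
import Mathlib
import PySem

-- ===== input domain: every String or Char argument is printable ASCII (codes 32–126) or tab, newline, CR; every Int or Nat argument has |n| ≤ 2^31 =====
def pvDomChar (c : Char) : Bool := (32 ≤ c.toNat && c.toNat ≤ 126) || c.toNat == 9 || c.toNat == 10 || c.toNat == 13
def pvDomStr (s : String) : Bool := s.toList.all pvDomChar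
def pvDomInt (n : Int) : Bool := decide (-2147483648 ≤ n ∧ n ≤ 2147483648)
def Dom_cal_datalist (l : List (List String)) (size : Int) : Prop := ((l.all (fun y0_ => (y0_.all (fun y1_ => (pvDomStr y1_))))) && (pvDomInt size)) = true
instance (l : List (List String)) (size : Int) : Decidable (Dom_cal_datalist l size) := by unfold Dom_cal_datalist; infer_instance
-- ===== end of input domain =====

-- B builds the table column-major (per position, over the precomputed flags) instead of
-- A's row-major mutation sweep; same values, alternative decomposition, no speed claim.
-- Where the Python raises (empty item, or a non-int string among item[-1] and the first
-- min(len(item), size) entries), both ports use a 0 default; those inputs are outside Pre_.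

-- ===== PORT A =====
-- flag = int(item[-1]) (0 default where Python raises; such inputs are outside Pre_)
def pvFlag (item : List String) : Int :=
  (PySem.Int.ofStr? ((PySem.List.pyGet? item (-1)).getD "")).getD 0

-- the if/elif chain incrementing data_list[i][slot]
def pvStepA (flag v : Int) (row : List Int) : List Int :=
  if flag = 1 ∧ v = 1 then row.set 0 (row.getD 0 0 + 1)
  else if flag = 1 ∧ v = 0 then row.set 1 (row.getD 1 0 + 1)
  else if flag = 0 ∧ v = 1 then row.set 2 (row.getD 2 0 + 1)
  else if flag = 0 ∧ v = 0 then row.set 3 (row.getD 3 0 + 1)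
  else row

-- the inner 'for data in item' loop with counter i and the 'break' on i >= size
def pvInnerA (size flag : Int) : List String → Int → List (List Int) → List (List Int)
  | [], _, dl => dl
  | d :: rest, i, dl =>
    if size ≤ i then dl
    else pvInnerA size flag rest (i + 1)
      (dl.set i.toNat (pvStepA flag ((PySem.Int.ofStr? d).getD 0) (dl.getD i.toNat [])))

def cal_datalist (l : List (List String)) (size : Int) : List (List Int) :=
  let init := List.replicate size.toNat [0, 0, 0, 0]
  l.foldl (fun dl item => pvInnerA size (pvFlag item) item 0 dl) init

-- ===== PORT B =====
-- one column's fold step: row[(1-f)*2+(1-v)] += 1 when f,v ∈ {0,1}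
def pvStepB (f v : Int) (row : List Int) : List Int :=
  if (f = 0 ∨ f = 1) ∧ (v = 0 ∨ v = 1) then
    row.set ((1 - f) * 2 + (1 - v)).toNat (row.getD ((1 - f) * 2 + (1 - v)).toNat 0 + 1)
  else row

def cal_datalist_alt (l : List (List String)) (size : Int) : List (List Int) :=
  let flags := l.map pvFlag
  (PySem.List.pyRange 0 size 1).map (fun k =>
    (l.zip flags).foldl (fun row p =>
      if k < (p.1.length : Int) then
        pvStepB p.2 ((PySem.Int.ofStr? ((PySem.List.pyGet? p.1 k).getD "")).getD 0) row
      else row) [0, 0, 0, 0])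

-- ===== PRECONDITION & SPEC =====
-- Pre_ excludes exactly the inputs where the Python raises: an empty item (IndexError on
-- item[-1]) or a ValueError from int() on item[-1] or on one of the first min(len, size)
-- entries of an item.
def Pre_cal_datalist (l : List (List String)) (size : Int) : Prop :=
  ∀ item ∈ l, item ≠ [] ∧ (PySem.Int.ofStr? (item.getLastD "")).isSome = true ∧
    ∀ s ∈ item.take size.toNat, (PySem.Int.ofStr? s).isSome = true
instance (l : List (List String)) (size : Int) : Decidable (Pre_cal_datalist l size) := by
  unfold Pre_cal_datalist; infer_instance

def pvWitness_cal_datalist : List (List String) × Int := ([["1", "0", "1"], ["0", "1", "0"]], 2)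

def Spec_cal_datalist (l : List (List String)) (size : Int) (out : List (List Int)) : Prop := out = cal_datalist_alt l size
instance (l : List (List String)) (size : Int) (out : List (List Int)) : Decidable (Spec_cal_datalist l size out) := by unfold Spec_cal_datalist; infer_instance

-- ===== CLAIM (what is proved, stated in full; the proofs are below) =====
def Claim_equal_cal_datalist : Prop := ∀ (l : List (List String)) (size : Int), Dom_cal_datalist l size → Pre_cal_datalist l size → Spec_cal_datalist l size (cal_datalist l size)

-- ===== LEMMAS AND PROOFS =====

-- the two increment steps agree
lemma stepA_eq_stepB (f v : Int) (row : List Int) : pvStepA f v row = pvStepB f v row := by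
  unfold pvStepA pvStepB
  by_cases hf1 : f = 1 <;> by_cases hf0 : f = 0 <;>
    by_cases hv1 : v = 1 <;> by_cases hv0 : v = 0 <;>
    simp_all

-- value of item at nonnegative offset, as both ports read it
def pvVal (item : List String) (n : Nat) : Int :=
  (PySem.Int.ofStr? (item.getD n "")).getD 0

-- effect of pvInnerA on entry k of the table
lemma innerA_getElem? (size flag : Int) (item : List String) (i : Int) (hi : 0 ≤ i)
    (dl : List (List Int)) (k : Nat) :
    (pvInnerA size flag item i dl)[k]? =
      if i ≤ (k : Int) ∧ (k : Int) < size ∧ (k : Int) - i < (item.length : Int)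
      then (dl[k]?).map (pvStepA flag (pvVal item ((k : Int) - i).toNat))
      else dl[k]? := by
  induction item generalizing i dl with
  | nil =>
    simp only [pvInnerA, List.length_nil]
    rw [if_neg]; omega
  | cons d rest ih =>
    simp only [pvInnerA]
    by_cases hsz : size ≤ i
    · rw [if_pos hsz, if_neg]; omega
    · rw [if_neg hsz, ih (i + 1) (by omega)]
      by_cases hk : (k : Int) = i
      · have hki : i.toNat = k := by omega
        rw [if_neg (by omega), if_pos (by simp; omega)]
        have h0 : ((k : Int) - i).toNat = 0 := by omega
        rw [h0, hki]
        by_cases hlen : k < dl.length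
        · have hg : dl[k]? = some dl[k] := List.getElem?_eq_getElem hlen
          rw [List.getElem?_set_self hlen, hg]
          simp only [Option.map_some]
          congr 2 <;> simp [List.getD_eq_getElem?_getD, hg]
        · rw [List.getElem?_eq_none (by simp only [List.length_set]; omega),
              List.getElem?_eq_none (by omega)]
          rfl
      · rw [List.getElem?_set_ne (by omega)]
        by_cases hcond : i + 1 ≤ (k : Int) ∧ (k : Int) < size ∧ (k : Int) - (i + 1) < (rest.length : Int)
        · rw [if_pos hcond, if_pos (by simp; omega)]
          congr 2
          have h1 : ((k : Int) - i).toNat = (((k : Int) - (i + 1)).toNat) + 1 := by omega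
          rw [h1]
          simp [pvVal]
        · rw [if_neg hcond, if_neg (by simp; omega)]

-- per-column step over an item (the common shape)
def pvColStep (size : Int) (k : Nat) (row : List Int) (item : List String) : List Int :=
  if (k : Int) < size ∧ k < item.length then pvStepA (pvFlag item) (pvVal item k) row else row

-- the outer fold of A, viewed at one table index
lemma foldA_getElem? (size : Int) (l : List (List String)) (dl : List (List Int)) (k : Nat) :
    (l.foldl (fun dl item => pvInnerA size (pvFlag item) item 0 dl) dl)[k]? =
      (dl[k]?).map (fun r => l.foldl (pvColStep size k) r) := by
  induction l generalizing dl with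
  | nil => simp
  | cons item rest ih =>
    simp only [List.foldl_cons]
    rw [ih]
    have h := innerA_getElem? size (pvFlag item) item 0 le_rfl dl k
    by_cases hcond : (k : Int) < size ∧ k < item.length
    · rw [h, if_pos (by omega)]
      cases dl[k]? with
      | none => simp
      | some r =>
        simp only [Option.map_some]
        congr 1
        have hk0 : ((k : Int) - 0).toNat = k := by omega
        unfold pvColStep
        rw [if_pos hcond, hk0]
    · rw [h, if_neg (by omega)]
      cases dl[k]? with
      | none => simp
      | some r =>
        simp only [Option.map_some]
        congr 1
        unfold pvColStep
        rw [if_neg (by omega)]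

-- B's fold over the zipped flags equals the column-step fold
lemma foldB_eq_colfold (size : Int) (l : List (List String)) (k : Nat)
    (hk : (k : Int) < size) (row : List Int) :
    (l.zip (l.map pvFlag)).foldl (fun row p =>
        if (k : Int) < (p.1.length : Int) then
          pvStepB p.2 ((PySem.Int.ofStr? ((PySem.List.pyGet? p.1 (k : Int)).getD "")).getD 0) row
        else row) row
      = l.foldl (pvColStep size k) row := by
  induction l generalizing row with
  | nil => rfl
  | cons item rest ih =>
    simp only [List.map_cons, List.zip_cons_cons, List.foldl_cons]
    rw [ih]
    congr 1
    unfold pvColStep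
    by_cases hlen : k < item.length
    · rw [if_pos (by exact_mod_cast hlen), if_pos ⟨hk, hlen⟩, ← stepA_eq_stepB]
      congr 1
      rw [PySem.List.pyGet?_natCast]
      unfold pvVal
      rw [List.getElem?_eq_getElem hlen, List.getD_eq_getElem?_getD, List.getElem?_eq_getElem hlen]
    · rw [if_neg (by exact_mod_cast hlen), if_neg (by omega)]

-- ===== VERDICT (by name: the statement is the Claim_ definition above) =====
theorem cal_datalist_spec : Claim_equal_cal_datalist := by
  intro l size _ _
  unfold Spec_cal_datalist cal_datalist cal_datalist_alt
  apply List.ext_getElem?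
  intro k
  rw [foldA_getElem? size l (List.replicate size.toNat [0, 0, 0, 0]) k]
  by_cases hk : k < size.toNat
  · rw [List.getElem?_replicate, if_pos hk, List.getElem?_map,
        PySem.List.getElem?_pyRange_one]
    rw [if_pos (by simpa using hk)]
    simp only [Option.map_some, zero_add]
    congr 1
    rw [foldB_eq_colfold size l k (by omega)]
  · rw [List.getElem?_replicate, if_neg hk, List.getElem?_map,
        List.getElem?_eq_none (by rw [PySem.List.length_pyRange_one]; omega)]
    rfl
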